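-- pv_equiv track=rewrite | github.com/skullhac/L | analysis_excersices.py | count_common_elements_hash_table
-- ===== SOURCE A (Python) =====
-- def count_common_elements_hash_table(l1, l2):
--     table = {}
--     common_elements = []
--     for v in l1:
--         table[v] = True
--     count = 0
--     for w in l2:
--         if table.get(w):  # Avoid KeyError that would arise with table[w]
--             common_elements.append(w)
--             count += 1
--     return count
-- ===== SOURCE B (Python) =====
-- def count_common_elements_hash_table(l1, l2):
--     counts = {}
--     for v in l2:
--         counts[v] = counts.get(v, 0) + 1
--     s1 = set(l1)
--     return sum(c for v, c in counts.items() if v in s1)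
-- ===== Notes on version B (the rewrite author's own statement) =====
-- stated objective: alternative
-- what changed: B builds a frequency table of l2 and a set of l1, then sums multiplicities over the distinct values of l2 that occur in l1, instead of A's per-element membership loop over l2.
import Mathlib
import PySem

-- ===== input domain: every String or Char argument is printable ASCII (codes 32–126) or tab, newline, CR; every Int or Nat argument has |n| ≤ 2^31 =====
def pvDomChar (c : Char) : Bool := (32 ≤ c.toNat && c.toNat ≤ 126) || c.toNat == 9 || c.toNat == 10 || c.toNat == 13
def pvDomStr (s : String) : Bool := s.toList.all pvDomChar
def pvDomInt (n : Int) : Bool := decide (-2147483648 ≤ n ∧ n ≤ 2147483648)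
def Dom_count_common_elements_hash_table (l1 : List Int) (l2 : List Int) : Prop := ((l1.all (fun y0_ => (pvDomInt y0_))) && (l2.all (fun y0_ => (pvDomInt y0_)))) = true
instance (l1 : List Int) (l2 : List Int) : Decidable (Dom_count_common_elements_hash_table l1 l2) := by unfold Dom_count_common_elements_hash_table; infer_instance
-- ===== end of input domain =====

-- B replaces A's per-element membership loop over l2 by a grouped pass: a frequency
-- table of l2 and a set of l1, summing multiplicities of the distinct common values
-- (alternative decomposition; same asymptotic cost).

-- ===== PORT A =====
def count_common_elements_hash_table (l1 : List Int) (l2 : List Int) : Int :=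
  let table := l1.foldl (fun (d : PySem.Dict Int Bool) v => d.insert v true) PySem.Dict.empty
  -- state: (common_elements, count); 'if table.get(w):' is truthy iff the lookup yields True
  let st := l2.foldl (fun (st : List Int × Int) w =>
      if (table.get? w).getD false then (st.1 ++ [w], st.2 + 1) else st) ([], 0)
  st.2

-- ===== PORT B =====
def count_common_elements_hash_table_alt (l1 : List Int) (l2 : List Int) : Int :=
  let counts := l2.foldl (fun (d : PySem.Dict Int Int) v => d.insert v (d.getD v 0 + 1)) PySem.Dict.empty
  let s1 := PySem.Set.ofList l1
  counts.items.foldl (fun t p => if PySem.Set.contains s1 p.1 then t + p.2 else t) 0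

-- ===== PRECONDITION & SPEC =====
def Spec_count_common_elements_hash_table (l1 : List Int) (l2 : List Int) (out : Int) : Prop := out = count_common_elements_hash_table_alt l1 l2
instance (l1 : List Int) (l2 : List Int) (out : Int) : Decidable (Spec_count_common_elements_hash_table l1 l2 out) := by unfold Spec_count_common_elements_hash_table; infer_instance

-- ===== CLAIM (what is proved, stated in full; the proofs are below) =====
def Claim_equal_count_common_elements_hash_table : Prop := ∀ (l1 : List Int) (l2 : List Int), Dom_count_common_elements_hash_table l1 l2 → Spec_count_common_elements_hash_table l1 l2 (count_common_elements_hash_table l1 l2)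

-- ===== LEMMAS AND PROOFS =====

-- A's table lookup: get? is 'some true' exactly on members of l1
lemma pv_table_get (l1 : List Int) (w : Int) : ∀ (d : PySem.Dict Int Bool),
    (l1.foldl (fun d v => d.insert v true) d).get? w = if w ∈ l1 then some true else d.get? w := by
  induction l1 with
  | nil => intro d; simp
  | cons a t ih =>
    intro d
    simp only [List.foldl_cons, ih, PySem.Dict.get?_insert, List.mem_cons]
    by_cases ht : w ∈ t <;> by_cases ha : w = a <;> simp [ht, ha]

-- A's counting loop computes countP of its condition
lemma pv_loopA (cond : Int → Bool) (l2 : List Int) : ∀ (cs : List Int) (c : Int),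
    (l2.foldl (fun (st : List Int × Int) w =>
        if cond w then (st.1 ++ [w], st.2 + 1) else st) (cs, c)).2 = c + (l2.countP cond : Int) := by
  induction l2 with
  | nil => intro cs c; simp
  | cons a t ih =>
    intro cs c
    by_cases h : cond a
    · simp [h, ih, List.countP_cons]; push_cast; ring
    · simp [h, ih, List.countP_cons]

-- countP of a disjoint disjunction splits
lemma pv_countP_or (l : List Int) (p q : Int → Bool) (h : ∀ w, ¬(p w = true ∧ q w = true)) :
    l.countP (fun w => p w || q w) = l.countP p + l.countP q := by
  induction l with
  | nil => simp
  | cons a t ih =>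
    by_cases hp : p a <;> by_cases hq : q a <;>
      simp_all [List.countP_cons, hp, hq] <;> omega

-- B's grouped sum over distinct values equals the element-wise countP
lemma pv_sumB (p1 : Int → Bool) (l2 : List Int) : ∀ (s : List Int), s.Nodup → ∀ (t0 : Int),
    ((s.map (fun k => (k, (l2.count k : Int)))).foldl
        (fun t p => if p1 p.1 then t + p.2 else t) t0)
      = t0 + (l2.countP (fun w => s.contains w && p1 w) : Int) := by
  intro s
  induction s with
  | nil => intro _ t0; simp
  | cons a s ih =>
    intro hnd t0
    have hnd' : s.Nodup := hnd.of_cons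
    have hna : a ∉ s := by simp [List.nodup_cons] at hnd; exact hnd.1
    simp only [List.map_cons, List.foldl_cons]
    rw [ih hnd']
    have hsplit : l2.countP (fun w => (a :: s).contains w && p1 w)
        = l2.countP (fun w => (w == a) && p1 w)
          + l2.countP (fun w => s.contains w && p1 w) := by
      have hd := pv_countP_or l2 (fun w => (w == a) && p1 w)
        (fun w => s.contains w && p1 w) (by
          intro w hw
          rcases hw with ⟨h1, h2⟩
          simp at h1 h2
          exact hna (h1.1 ▸ h2.1))
      rw [← hd]
      apply List.countP_congr
      intro w _
      cases h1 : p1 w <;> simp [h1, List.contains_cons]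
    rw [hsplit]
    by_cases hl : p1 a = true
    · have hc : l2.countP (fun w => (w == a) && p1 w) = l2.count a := by
        rw [List.count]
        apply List.countP_congr
        intro w _
        by_cases hwa : w = a <;> simp [hwa, hl]
      simp only [hl, if_pos]
      rw [hc]; push_cast; ring
    · have hc : l2.countP (fun w => (w == a) && p1 w) = 0 := by
        rw [List.countP_eq_zero]
        intro w _
        by_cases hwa : w = a <;> simp [hwa, hl]
      simp only [hl, if_neg]
      rw [hc]; push_cast; ring

-- ===== VERDICT (by name: the statement is the Claim_ definition above) =====
theorem count_common_elements_hash_table_spec : Claim_equal_count_common_elements_hash_table := by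
  intro l1 l2 _
  unfold Spec_count_common_elements_hash_table
  unfold count_common_elements_hash_table count_common_elements_hash_table_alt
  simp only
  rw [PySem.Dict.foldl_insert_getD_add_one_eq_counter, PySem.Dict.items_counter]
  rw [pv_loopA, pv_sumB (fun x => PySem.Set.contains (PySem.Set.ofList l1) x) l2
    (PySem.Set.ofList l2) (PySem.Set.nodup_ofList l2) 0]
  simp only [zero_add]
  congr 1
  apply List.countP_congr
  intro w hw
  have h1 : (PySem.Set.ofList l2).contains w = true := by
    simp [List.contains_iff_mem, PySem.Set.mem_ofList, hw]
  rw [pv_table_get l1 w]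
  by_cases hm : w ∈ l1 <;>
    simp [hm, hw, h1, PySem.Set.contains, List.contains_iff_mem, PySem.Set.mem_ofList]
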